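-- pv_equiv track=rewrite | github.com/doveva/UGS_v2.0 | Django_prod/old/UGS_module/functions/functions_for_forecasting.py | put_inside_
-- ===== SOURCE A (Python) =====
-- def put_inside_(list1, list2):
--     """Распределение элементов list2 среди элементов list1.
--     """
--
--     m = len(list1)
--     n = len(list2)
--
--     if m % n != 0:
--         raise Exception('Длина массаива list1 не кратна list2')
--
--     k = m // n + 1
--     for i in range(n):
--         list1.insert((k - 1) + k * i, list2[i])
--
--     return list1
-- ===== SOURCE B (Python) =====
-- def put_inside_(list1, list2):
--     """Распределение элементов list2 среди элементов list1.
--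
--     Single pass with a cursor: for each element of list2, copy the next
--     block of q = m//n elements of list1 into a fresh result list, then the
--     list2 element; finally write back with slice assignment so list1 is
--     mutated in place and returned. Same guards as the original, so n == 0
--     still raises ZeroDivisionError and non-divisible lengths the custom
--     Exception.
--     """
--     m = len(list1)
--     n = len(list2)
--
--     if m % n != 0:
--         raise Exception('Длина массаива list1 не кратна list2')
--
--     q = m // n
--
--     res = []
--     i = 0
--     for y in list2:
--         res.extend(list1[i:i + q])
--         res.append(y)
--         i += q
--     list1[:] = res
--     return list1
-- ===== Notes on version B (the rewrite author's own statement) =====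
-- stated objective: faster
-- what changed: Instead of n shifting list.insert calls into the growing list, B makes one cursor-driven pass: it copies the next block of q = m//n elements of list1 and one element of list2 into a fresh result list, then writes it back in place.
import Mathlib
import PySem

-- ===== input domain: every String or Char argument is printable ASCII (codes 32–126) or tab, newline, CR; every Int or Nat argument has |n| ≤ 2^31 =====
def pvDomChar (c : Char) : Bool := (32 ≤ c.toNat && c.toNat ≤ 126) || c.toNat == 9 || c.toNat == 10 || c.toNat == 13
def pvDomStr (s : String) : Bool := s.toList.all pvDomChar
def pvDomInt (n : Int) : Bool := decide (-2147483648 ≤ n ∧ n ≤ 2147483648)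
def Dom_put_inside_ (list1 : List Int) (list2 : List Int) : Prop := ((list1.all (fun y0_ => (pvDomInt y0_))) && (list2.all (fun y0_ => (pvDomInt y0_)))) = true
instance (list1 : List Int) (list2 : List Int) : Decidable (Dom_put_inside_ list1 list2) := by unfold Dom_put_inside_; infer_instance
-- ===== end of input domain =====

-- B replaces A's n shifting list.insert calls by one cursor-driven pass that copies a block of
-- q = m//n elements of list1 followed by one element of list2 into a fresh result list. Both
-- Pythons mutate list1 in place and return it; the theorems here are about the return value.

-- ===== PORT A =====
def put_inside_ (list1 : List Int) (list2 : List Int) : List Int :=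
  let m : Int := list1.length
  let n : Int := list2.length
  if PySem.Int.mod m n ≠ 0 then list1  -- Python raises here (Exception, or ZeroDivisionError when n = 0): outside Pre_
  else
    let k : Int := PySem.Int.floordiv m n + 1
    (PySem.List.pyRange 0 n 1).foldl
      (fun acc i => PySem.List.insert acc ((k - 1) + k * i) (PySem.List.pyGetD list2 i 0)) list1

-- ===== PORT B =====
-- Source B's 'for y in list2' loop: state = (res, cursor i); list1[i:i+q] ported with PySem.List.slice
def pvCopyLoop (list1 : List Int) (q : Int) : List Int → List Int → Int → List Int
  | res, [], _ => res
  | res, y :: ys, i =>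
      pvCopyLoop list1 q (res ++ PySem.List.slice list1 (some i) (some (i + q)) ++ [y]) ys (i + q)

def put_inside__alt (list1 : List Int) (list2 : List Int) : List Int :=
  let m : Int := list1.length
  let n : Int := list2.length
  if PySem.Int.mod m n ≠ 0 then list1  -- same guard, same raises: outside Pre_
  else pvCopyLoop list1 (PySem.Int.floordiv m n) [] list2 0

-- ===== PRECONDITION & SPEC =====
-- Pre_ excludes exactly the inputs on which A raises: list2 empty (ZeroDivisionError at m % n)
-- and len(list1) not a multiple of len(list2) (the custom Exception).
def Pre_put_inside_ (list1 : List Int) (list2 : List Int) : Prop :=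
  list2 ≠ [] ∧ list1.length % list2.length = 0
instance (list1 : List Int) (list2 : List Int) : Decidable (Pre_put_inside_ list1 list2) := by unfold Pre_put_inside_; infer_instance

def pvWitness_put_inside_ : List Int × List Int := ([1, 2, 3, 4], [7, 8])

def Spec_put_inside_ (list1 : List Int) (list2 : List Int) (out : List Int) : Prop := out = put_inside__alt list1 list2
instance (list1 : List Int) (list2 : List Int) (out : List Int) : Decidable (Spec_put_inside_ list1 list2 out) := by unfold Spec_put_inside_; infer_instance

-- ===== CLAIM (what is proved, stated in full; the proofs are below) =====
def Claim_equal_put_inside_ : Prop := ∀ (list1 : List Int) (list2 : List Int), Dom_put_inside_ list1 list2 → Pre_put_inside_ list1 list2 → Spec_put_inside_ list1 list2 (put_inside_ list1 list2)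

-- ===== LEMMAS AND PROOFS =====

-- the common shape of both results, over Nat arithmetic
def pvInter (q : Nat) : List Int → List Int → List Int
  | xs, [] => xs
  | xs, y :: ys => xs.take q ++ y :: pvInter q (xs.drop q) ys

-- B-side: the cursor loop produces pvInter on the suffix of list1 past the cursor
theorem pv_alt_inter (L : List Int) (q : Nat) : ∀ (ys : List Int) (res : List Int) (i : Nat),
    L.length ≤ i + ys.length * q →
    pvCopyLoop L ((q : Nat) : Int) res ys ((i : Nat) : Int) = res ++ pvInter q (L.drop i) ys := by
  intro ys
  induction ys with
  | nil =>
    intro res i hlen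
    rw [pvCopyLoop, pvInter]
    rw [List.drop_eq_nil_of_le (by simpa using hlen), List.append_nil]
  | cons y ys ih =>
    intro res i hlen
    have hcast : ((i : Nat) : Int) + ((q : Nat) : Int) = (((i + q : Nat)) : Int) := by push_cast; ring
    rw [pvCopyLoop, hcast, PySem.List.slice_natCast,
        ih _ (i + q) (by
          simp only [List.length_cons] at hlen
          have hm : (ys.length + 1) * q = ys.length * q + q := by ring
          omega)]
    have hd : (L.drop i).take (i + q - i) = (L.drop i).take q := by
      congr 1
      omega
    rw [hd]
    have hun : pvInter q (L.drop i) (y :: ys)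
        = (L.drop i).take q ++ y :: pvInter q ((L.drop i).drop q) ys := rfl
    rw [hun, List.drop_drop]
    have hiq : i + q = q + i := Nat.add_comm i q
    rw [hiq]
    simp [List.append_assoc]

-- A-side: the insert fold produces pvInter; P is the finished prefix, R the untouched rest
theorem pv_a_fold (ys : List Int) (q : Nat) (k : Int) (hk : k = (q : Int) + 1) :
    ∀ (c : Nat) (j : Nat) (P R : List Int), c = ys.length - j → j ≤ ys.length →
      P.length = (q + 1) * j → R.length = q * (ys.length - j) →
      (PySem.List.pyRange (j : Int) (ys.length : Int) 1).foldl
          (fun acc i => PySem.List.insert acc ((k - 1) + k * i) (PySem.List.pyGetD ys i 0)) (P ++ R)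
        = P ++ pvInter q R (ys.drop j) := by
  intro c
  induction c with
  | zero =>
    intro j P R hc hj hP hR
    have hj' : j = ys.length := by omega
    have hR' : R = [] := by
      have h0 : R.length = 0 := by rw [hR, hj', Nat.sub_self, Nat.mul_zero]
      simpa using h0
    subst hj' hR'
    rw [PySem.List.pyRange_one_eq_nil (le_refl _)]
    simp [pvInter]
  | succ c ih =>
    intro j P R hc hj hP hR
    have hjlt : j < ys.length := by omega
    have hqR : q ≤ R.length := by
      have h1 : 1 ≤ ys.length - j := by omega
      calc q = q * 1 := (Nat.mul_one q).symm
        _ ≤ q * (ys.length - j) := Nat.mul_le_mul_left q h1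
        _ = R.length := hR.symm
    rw [PySem.List.pyRange_one_cons (by exact_mod_cast hjlt), List.foldl_cons]
    have hidx : (k - 1) + k * (j : Int) = ((P.length + q : Nat) : Int) := by
      rw [hk, hP]; push_cast; ring
    have hget : PySem.List.pyGetD ys (j : Int) (0 : Int) = ys[j] := by
      rw [PySem.List.pyGetD_natCast]
      exact List.getD_eq_getElem ys 0 hjlt
    rw [hidx, hget,
        PySem.List.insert_natCast (P ++ R) (P.length + q) _ (by rw [List.length_append]; omega)]
    have htake : (P ++ R).take (P.length + q) = P ++ R.take q := by
      rw [List.take_append]; simp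
    have hdrop : (P ++ R).drop (P.length + q) = R.drop q := by
      rw [List.drop_append]; simp
    rw [htake, hdrop]
    have hre : P ++ R.take q ++ ys[j] :: R.drop q = (P ++ (R.take q ++ [ys[j]])) ++ R.drop q := by
      simp [List.append_assoc]
    rw [hre]
    have hc1 : ((j : Int) + 1) = ((j + 1 : Nat) : Int) := by push_cast; ring
    have hP' : (P ++ (R.take q ++ [ys[j]])).length = (q + 1) * (j + 1) := by
      simp [List.length_append, List.length_take, Nat.min_eq_left hqR, hP]
      ring
    have hR' : (R.drop q).length = q * (ys.length - (j + 1)) := by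
      rw [List.length_drop, hR]
      have h1 : q * (ys.length - j) = q * (ys.length - (j + 1)) + q := by
        have h2 : ys.length - j = (ys.length - (j + 1)) + 1 := by omega
        rw [h2]; ring
      omega
    rw [hc1, ih (j + 1) (P ++ (R.take q ++ [ys[j]])) (R.drop q) (by omega) (by omega) hP' hR']
    have hdj : ys.drop j = ys[j] :: ys.drop (j + 1) := List.drop_eq_getElem_cons hjlt
    rw [hdj]
    simp [pvInter, List.append_assoc]

-- ===== VERDICT (by name: the statement is the Claim_ definition above) =====
theorem put_inside__spec : Claim_equal_put_inside_ := by
  intro list1 list2 _ hpre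
  obtain ⟨hne, hmod⟩ := hpre
  have hn : list2.length ≠ 0 := by simpa [List.length_eq_zero_iff] using hne
  have hdvd : list2.length ∣ list1.length := Nat.dvd_of_mod_eq_zero hmod
  have hmq : list1.length = (list1.length / list2.length) * list2.length :=
    (Nat.div_mul_cancel hdvd).symm
  have hmodZ : PySem.Int.mod (list1.length : Int) (list2.length : Int) = 0 := by
    rw [PySem.Int.mod_natCast, hmod]; rfl
  have hfd : PySem.Int.floordiv (list1.length : Int) (list2.length : Int)
      = ((list1.length / list2.length : Nat) : Int) := PySem.Int.floordiv_natCast _ _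
  unfold Spec_put_inside_ put_inside_ put_inside__alt
  simp only [hmodZ, hfd, ne_eq, not_true_eq_false, if_false]
  have hA := pv_a_fold list2 (list1.length / list2.length)
      (((list1.length / list2.length : Nat) : Int) + 1) rfl list2.length 0 [] list1
      (by omega) (by omega) (by simp)
      (by rw [Nat.sub_zero]; exact hmq)
  have hB := pv_alt_inter list1 (list1.length / list2.length) list2 [] 0
      (by
        have h : list2.length * (list1.length / list2.length) = list1.length := by
          rw [Nat.mul_comm]; exact hmq.symm
        omega)
  simp only [Nat.cast_zero, List.nil_append, List.drop_zero] at hA hB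
  rw [hA, hB]
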